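-- pv_equiv track=rewrite | github.com/danydoerr/spp_dcj | scripts/noisy_adjacencies.py | parseUniMoG
-- ===== SOURCE A (Python) =====
-- CHR_CIRCULAR    = ')'
--
-- CHR_LINEAR      = '|'
--
-- ORIENT_NEGATIVE = '-'
--
-- ORIENT_POSITIVE = '+'
--
-- def parseUniMoG(data, genomesOnly=None):
--     """Read genome in UniMoG format
--     (https://bibiserv.cebitec.uni-bielefeld.de/dcj?id=dcj_manual)"""
--
--     res = list()
--
--     # helper function for parsing each individual gene
--     str2gene = lambda x: x.startswith(ORIENT_NEGATIVE) and (ORIENT_NEGATIVE, \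
--             x[1:]) or (ORIENT_POSITIVE, x.lstrip(ORIENT_POSITIVE))
--     # process each line, assuming that the file is well-formatted
--     skip = False
--     for line in data:
--         line = line.strip()
--         if line:
--             if line.startswith('>'):
--                 genomeName = line[1:].strip()
--                 if genomesOnly == None or genomeName in genomesOnly:
--                     skip = False
--                     res.append((genomeName, list()))
--                 elif genomesOnly:
--                     skip = True
--             elif line[-1] not in (CHR_CIRCULAR, CHR_LINEAR):
--
--                 raise Exception('Invalid format, expected chromosome to ' + \
--                         'end with either \'%s\' or \'%s\'' %(CHR_CIRCULAR, \
--                         CHR_LINEAR))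
--             elif not skip:
--                 res[-1][1].append((line[-1], list(map(str2gene,
--                     line[:-1].split()))))
--     return res
-- ===== SOURCE B (Python) =====
-- CHR_CIRCULAR    = ')'
-- CHR_LINEAR      = '|'
-- ORIENT_NEGATIVE = '-'
-- ORIENT_POSITIVE = '+'
--
-- def parseUniMoG(data, genomesOnly=None):
--     """Read genome in UniMoG format: group the lines into (name, chromosome
--     lines) blocks first, then render the blocks that are selected."""
--
--     # pass 1: split the input into header-led blocks, validating chromosome lines
--     blocks = []
--     for raw in data:
--         line = raw.strip()
--         if not line:
--             continue
--         if line.startswith('>'):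
--             blocks.append((line[1:].strip(), []))
--         elif line[-1] not in (CHR_CIRCULAR, CHR_LINEAR):
--             raise Exception('Invalid format, expected chromosome to ' +
--                     'end with either \'%s\' or \'%s\'' % (CHR_CIRCULAR,
--                     CHR_LINEAR))
--         else:
--             blocks[-1][1].append(line)
--
--     def gene(x):
--         if x.startswith(ORIENT_NEGATIVE):
--             return (ORIENT_NEGATIVE, x[1:])
--         return (ORIENT_POSITIVE, x.lstrip(ORIENT_POSITIVE))
--
--     # pass 2: keep the selected genomes and parse their chromosomes
--     return [(name, [(l[-1], [gene(t) for t in l[:-1].split()]) for l in lines])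
--             for name, lines in blocks
--             if genomesOnly is None or name in genomesOnly]
-- ===== Notes on version B (the rewrite author's own statement) =====
-- stated objective: alternative
-- what changed: Replaces A's single loop that threads a skip flag and mutates res[-1] with a two-phase design: pass 1 groups the stripped lines into (header, chromosome-lines) blocks, pass 2 is a comprehension that filters the selected blocks and parses their chromosomes.
import Mathlib
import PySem

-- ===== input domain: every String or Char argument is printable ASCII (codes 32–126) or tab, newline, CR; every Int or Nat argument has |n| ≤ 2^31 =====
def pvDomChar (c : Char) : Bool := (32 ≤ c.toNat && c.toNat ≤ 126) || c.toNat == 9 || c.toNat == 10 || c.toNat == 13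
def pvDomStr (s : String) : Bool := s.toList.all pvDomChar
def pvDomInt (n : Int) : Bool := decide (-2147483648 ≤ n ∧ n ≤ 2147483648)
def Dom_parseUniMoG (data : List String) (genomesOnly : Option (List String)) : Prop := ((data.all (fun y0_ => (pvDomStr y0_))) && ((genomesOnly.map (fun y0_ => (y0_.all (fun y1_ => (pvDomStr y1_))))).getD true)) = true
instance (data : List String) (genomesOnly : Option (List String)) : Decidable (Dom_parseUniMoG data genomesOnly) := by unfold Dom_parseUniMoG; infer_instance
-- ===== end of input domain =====

-- B groups the lines into (name, chromosome-lines) blocks first and then renders the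
-- selected blocks, instead of A's one-pass loop threading a skip flag (objective: simpler).

-- shared small helper: xs[-1] = f(xs[-1]) (Python's res[-1][1].append pattern)
def pvModifyLast {α : Type} (f : α → α) : List α → List α
  | [] => []
  | [x] => [f x]
  | x :: y :: ys => x :: pvModifyLast f (y :: ys)

-- ===== PORT A =====
-- str2gene = lambda x: x.startswith('-') and ('-', x[1:]) or ('+', x.lstrip('+'))
-- (the two tuples are always truthy, so and/or is if/else here)
def pvGeneA (x : String) : String × String :=
  if PySem.Str.startswith x "-" then ("-", PySem.Str.slice x (some 1) none)
  else ("+", String.ofList (x.toList.dropWhile (· == '+')))  -- x.lstrip('+'): exact, drops the leading '+' run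

-- (line[-1], list(map(str2gene, line[:-1].split()))); line is stripped and nonempty so
-- line[-1] is in range and the .getD default is never used
def pvChromA (line : String) : String × List (String × String) :=
  (String.singleton ((PySem.Str.pyGet? line (-1)).getD ' '),
   (PySem.Str.split₀ (PySem.Str.slice line none (some (-1)))).map pvGeneA)

-- one iteration of A's loop; state none = the Python raised (Exception / IndexError)
def pvStepA (genomesOnly : Option (List String))
    (st : Option (List (String × (List (String × (List (String × String))))) × Bool))
    (raw : String) :
    Option (List (String × (List (String × (List (String × String))))) × Bool) :=
  match st with
  | none => none
  | some (res, skip) =>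
    let line := PySem.Str.strip raw
    if line = "" then some (res, skip)
    else if PySem.Str.startswith line ">" then
      let genomeName := PySem.Str.strip (PySem.Str.slice line (some 1) none)
      match genomesOnly with
      | none => some (res ++ [(genomeName, [])], false)
      | some l =>
        if genomeName ∈ l then some (res ++ [(genomeName, [])], false)
        else if l ≠ [] then some (res, true)     -- elif genomesOnly:
        else some (res, skip)
    else if ¬ ((PySem.Str.pyGet? line (-1)).getD ' ' ∈ [')', '|']) then none  -- raise Exception(...)
    else if skip then some (res, skip)
    else if res = [] then none                   -- res[-1] raises IndexError
    else some (pvModifyLast (fun gnm => (gnm.1, gnm.2 ++ [pvChromA line])) res, skip)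

def parseUniMoG (data : List String) (genomesOnly : Option (List String)) : List (String × (List (String × (List (String × String))))) :=
  match data.foldl (pvStepA genomesOnly) (some ([], false)) with
  | some (res, _) => res
  | none => []                                   -- the Python raised; outside Pre_

-- ===== PORT B =====
def pvGeneB (x : String) : String × String :=
  if PySem.Str.startswith x "-" then ("-", PySem.Str.slice x (some 1) none)
  else ("+", String.ofList (x.toList.dropWhile (· == '+')))  -- x.lstrip('+'): exact

def pvChromB (line : String) : String × List (String × String) :=
  (String.singleton ((PySem.Str.pyGet? line (-1)).getD ' '),
   (PySem.Str.split₀ (PySem.Str.slice line none (some (-1)))).map pvGeneB)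

-- pass 1 of B: one iteration of the grouping loop; none = the Python raised
def pvStepB (st : Option (List (String × List String))) (raw : String) :
    Option (List (String × List String)) :=
  match st with
  | none => none
  | some blocks =>
    let line := PySem.Str.strip raw
    if line = "" then some blocks
    else if PySem.Str.startswith line ">" then
      some (blocks ++ [(PySem.Str.strip (PySem.Str.slice line (some 1) none), [])])
    else if ¬ ((PySem.Str.pyGet? line (-1)).getD ' ' ∈ [')', '|']) then none
    else if blocks = [] then none                -- blocks[-1] raises IndexError
    else some (pvModifyLast (fun b => (b.1, b.2 ++ [line])) blocks)

def pvIncl (genomesOnly : Option (List String)) (name : String) : Bool :=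
  match genomesOnly with
  | none => true
  | some l => name ∈ l

-- pass 2 of B: the final comprehension (filter on inclusion, map each block)
def pvRender (genomesOnly : Option (List String)) (blocks : List (String × List String)) :
    List (String × (List (String × (List (String × String))))) :=
  (blocks.filter (fun b => pvIncl genomesOnly b.1)).map (fun b => (b.1, b.2.map pvChromB))

def parseUniMoG_alt (data : List String) (genomesOnly : Option (List String)) : List (String × (List (String × (List (String × String))))) :=
  match data.foldl pvStepB (some []) with
  | none => []                                   -- the Python raised; outside Pre_
  | some blocks => pvRender genomesOnly blocks

-- ===== PRECONDITION & SPEC =====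
-- line classifiers over a raw input line (all on the stripped line, as both programs strip first)
def pvLine (raw : String) : String := PySem.Str.strip raw
def pvIsHeader (raw : String) : Bool := pvLine raw ≠ "" && PySem.Str.startswith (pvLine raw) ">"
def pvIsChrom (raw : String) : Bool := pvLine raw ≠ "" && !PySem.Str.startswith (pvLine raw) ">"
def pvName (raw : String) : String := PySem.Str.strip (PySem.Str.slice (pvLine raw) (some 1) none)
def pvWf (raw : String) : Bool := decide ((PySem.Str.pyGet? (pvLine raw) (-1)).getD ' ' ∈ [')', '|'])
def pvIsIncl (genomesOnly : Option (List String)) (raw : String) : Bool :=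
  pvIsHeader raw && pvIncl genomesOnly (pvName raw)

-- Pre_ excludes exactly the inputs on which A raises: a chromosome line not ending in ')' or
-- '|' (Exception), and a chromosome line with no usable genome opened before it (IndexError):
-- before each chromosome line there must be an included header, or (genomesOnly a nonempty
-- list) any header.  On every other input A returns normally.
def Pre_parseUniMoG (data : List String) (genomesOnly : Option (List String)) : Prop :=
  ∀ i, (hi : i < data.length) → pvIsChrom data[i] = true →
    pvWf data[i] = true ∧
    ((∃ y ∈ data.take i, pvIsIncl genomesOnly y = true) ∨
     (genomesOnly.getD [] ≠ [] ∧ ∃ y ∈ data.take i, pvIsHeader y = true))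
instance (data : List String) (genomesOnly : Option (List String)) : Decidable (Pre_parseUniMoG data genomesOnly) := by unfold Pre_parseUniMoG; infer_instance

def pvWitness_parseUniMoG : List String × Option (List String) :=
  ([">G1", "a -b )", " ", ">G2", "+c |"], some ["G1", "G2"])

def Spec_parseUniMoG (data : List String) (genomesOnly : Option (List String)) (out : List (String × (List (String × (List (String × String)))))) : Prop := out = parseUniMoG_alt data genomesOnly
instance (data : List String) (genomesOnly : Option (List String)) (out : List (String × (List (String × (List (String × String)))))) : Decidable (Spec_parseUniMoG data genomesOnly out) := by unfold Spec_parseUniMoG; infer_instance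

-- ===== CLAIM (what is proved, stated in full; the proofs are below) =====
def Claim_equal_parseUniMoG : Prop := ∀ (data : List String) (genomesOnly : Option (List String)), Dom_parseUniMoG data genomesOnly → Pre_parseUniMoG data genomesOnly → Spec_parseUniMoG data genomesOnly (parseUniMoG data genomesOnly)


-- ===== LEMMAS AND PROOFS =====

-- the A-side "skip" flag, predicted from B's blocks: set iff the most recent header was
-- rejected while genomesOnly is a nonempty list
def pvSkipOf (genomesOnly : Option (List String)) (blocks : List (String × List String)) : Bool :=
  match genomesOnly, blocks.getLast? with
  | some l, some b => !decide (b.1 ∈ l) && !l.isEmpty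
  | _, _ => false

-- Pre_ re-stated as a predicate that walks the list once carrying "a header was seen" /
-- "an included header was seen" (proved equivalent to Pre_ below; used for the induction)
def pvPreAux (genomesOnly : Option (List String)) (hH hI : Bool) : List String → Prop
  | [] => True
  | raw :: rest =>
    if pvIsHeader raw then pvPreAux genomesOnly true (hI || pvIsIncl genomesOnly raw) rest
    else if pvIsChrom raw then
      (pvWf raw = true ∧ (hI = true ∨ (genomesOnly.getD [] ≠ [] ∧ hH = true))) ∧
      pvPreAux genomesOnly hH hI rest
    else pvPreAux genomesOnly hH hI rest

theorem pvModifyLast_cons {α : Type} (f : α → α) (a : α) (l : List α) (h : l ≠ []) :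
    pvModifyLast f (a :: l) = a :: pvModifyLast f l := by
  cases l with
  | nil => exact absurd rfl h
  | cons b t => rfl

theorem pvModifyLast_concat {α : Type} (f : α → α) (l : List α) (x : α) :
    pvModifyLast f (l ++ [x]) = l ++ [f x] := by
  induction l with
  | nil => rfl
  | cons a t ih => rw [List.cons_append, pvModifyLast_cons f a _ (by simp), ih, List.cons_append]

theorem pvRender_append_one (g : Option (List String)) (bs : List (String × List String)) (b : String × List String) :
    pvRender g (bs ++ [b]) =
      pvRender g bs ++ (if pvIncl g b.1 then [(b.1, b.2.map pvChromB)] else []) := by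
  simp [pvRender, List.filter_append, List.filter_cons]
  split <;> simp_all

theorem pvSkipOf_concat (g : Option (List String)) (bs : List (String × List String)) (b : String × List String) :
    pvSkipOf g (bs ++ [b]) =
      (match g with
       | none => false
       | some l => !decide (b.1 ∈ l) && !l.isEmpty) := by
  cases g <;> simp [pvSkipOf]

theorem pvSkipOf_some_nil (blocks : List (String × List String)) :
    pvSkipOf (some []) blocks = false := by
  simp only [pvSkipOf]
  cases blocks.getLast? <;> simp

theorem pvRender_some_nil (blocks : List (String × List String)) :
    pvRender (some []) blocks = [] := by
  simp [pvRender, pvIncl]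

-- the main invariant step: run both folds from related states
theorem pvMain (g : Option (List String)) :
    ∀ (data : List String) (blocks : List (String × List String)),
    pvPreAux g (!blocks.isEmpty) (!(pvRender g blocks).isEmpty) data →
    ∃ blocks', data.foldl pvStepB (some blocks) = some blocks' ∧
      data.foldl (pvStepA g) (some (pvRender g blocks, pvSkipOf g blocks)) =
        some (pvRender g blocks', pvSkipOf g blocks') := by
  intro data
  induction data with
  | nil => intro blocks _; exact ⟨blocks, rfl, rfl⟩
  | cons raw rest ih =>
    intro blocks hpre
    by_cases hhd : pvIsHeader raw = true
    · -- header line: both sides open a new block / genome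
      obtain ⟨hs, hst⟩ : PySem.Str.strip raw ≠ "" ∧
          PySem.Str.startswith (PySem.Str.strip raw) ">" = true := by
        simpa [pvIsHeader, pvLine] using hhd
      try simp at hs hst
      set n := PySem.Str.strip (PySem.Str.slice (PySem.Str.strip raw) (some 1) none) with hn
      have hB : pvStepB (some blocks) raw = some (blocks ++ [(n, [])]) := by
        simp [pvStepB, hs, hst, ← hn]
      have hA : pvStepA g (some (pvRender g blocks, pvSkipOf g blocks)) raw
          = some (pvRender g (blocks ++ [(n, [])]), pvSkipOf g (blocks ++ [(n, [])])) := by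
        rw [pvRender_append_one, pvSkipOf_concat]
        cases g with
        | none => simp [pvStepA, hs, hst, pvIncl, ← hn]
        | some l =>
          by_cases hm : n ∈ l
          · simp [pvStepA, hs, hst, pvIncl, hm, ← hn]
          · cases l with
            | nil => simp [pvStepA, hs, hst, pvIncl, pvSkipOf_some_nil, ← hn]
            | cons a t => simp [pvStepA, hs, hst, pvIncl, hm, ← hn]
      have hpre' : pvPreAux g (!(blocks ++ [(n, [])]).isEmpty)
          (!(pvRender g (blocks ++ [(n, [])])).isEmpty) rest := by
        have h0 : pvPreAux g true ((!(pvRender g blocks).isEmpty) || pvIsIncl g raw) rest := by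
          simpa [pvPreAux, hhd] using hpre
        have e2 : (!(pvRender g (blocks ++ [(n, [])])).isEmpty)
            = ((!(pvRender g blocks).isEmpty) || pvIsIncl g raw) := by
          rw [pvRender_append_one]
          have hni : pvIsIncl g raw = pvIncl g n := by simp [pvIsIncl, hhd, pvName, pvLine, hn]
          rw [hni]
          cases hi : pvIncl g n <;> simp
        have e1 : (!(blocks ++ [(n, [])]).isEmpty) = true := by cases blocks <;> rfl
        rw [e1, e2]; exact h0
      obtain ⟨blocks', h1, h2⟩ := ih (blocks ++ [(n, [])]) hpre'
      exact ⟨blocks', by rw [List.foldl_cons, hB, h1], by rw [List.foldl_cons, hA, h2]⟩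
    · by_cases hch : pvIsChrom raw = true
      · -- chromosome line
        obtain ⟨hs, hst⟩ : PySem.Str.strip raw ≠ "" ∧
            PySem.Str.startswith (PySem.Str.strip raw) ">" = false := by
          simpa [pvIsChrom, pvLine] using hch
        try simp at hs hst
        have hhd' : pvIsHeader raw = false := by simpa using hhd
        have hpre0 := hpre
        rw [show (raw :: rest) = (raw :: rest) from rfl] at hpre0
        simp only [pvPreAux, hhd', hch, Bool.false_eq_true, if_false, if_true] at hpre0
        obtain ⟨⟨hwf, hdisj⟩, hrest⟩ := hpre0
        have hmem : (PySem.Str.pyGet? (PySem.Str.strip raw) (-1)).getD ' ' ∈ [')', '|'] := by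
          simpa [pvWf, pvLine] using hwf
        try simp at hmem
        by_cases hskip : pvSkipOf g blocks = true
        · -- A is skipping: the current (last) block is a rejected one
          obtain ⟨l, rfl⟩ : ∃ l, g = some l := by
            cases g with
            | none => simp [pvSkipOf] at hskip
            | some l => exact ⟨l, rfl⟩
          obtain ⟨bs, b, rfl⟩ : ∃ bs b, blocks = bs ++ [b] := by
            rcases List.eq_nil_or_concat blocks with rfl | ⟨bs, b, h⟩
            · simp [pvSkipOf] at hskip
            · exact ⟨bs, b, by simp [h]⟩
          rw [pvSkipOf_concat] at hskip
          obtain ⟨hm, hl⟩ : b.1 ∉ l ∧ l.isEmpty = false := by simpa using hskip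
          have hreq : pvRender (some l) (bs ++ [(b.1, b.2 ++ [PySem.Str.strip raw])])
              = pvRender (some l) (bs ++ [b]) := by
            rw [pvRender_append_one, pvRender_append_one]; simp [pvIncl, hm]
          have hseq : pvSkipOf (some l) (bs ++ [(b.1, b.2 ++ [PySem.Str.strip raw])]) = true := by
            rw [pvSkipOf_concat]; simp [hm, hl]
          have hB : pvStepB (some (bs ++ [b])) raw
              = some (bs ++ [(b.1, b.2 ++ [PySem.Str.strip raw])]) := by
            simp [pvStepB, hs, hst, hmem, pvModifyLast_concat]
          have hA : pvStepA (some l) (some (pvRender (some l) (bs ++ [b]),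
              pvSkipOf (some l) (bs ++ [b]))) raw
              = some (pvRender (some l) (bs ++ [b]), pvSkipOf (some l) (bs ++ [b])) := by
            rw [pvSkipOf_concat]
            simp [pvStepA, hs, hst, hmem, hm, hl]
          have hpre' : pvPreAux (some l)
              (!(bs ++ [(b.1, b.2 ++ [PySem.Str.strip raw])]).isEmpty)
              (!(pvRender (some l) (bs ++ [(b.1, b.2 ++ [PySem.Str.strip raw])])).isEmpty)
              rest := by
            rw [hreq, show (!(bs ++ [(b.1, b.2 ++ [PySem.Str.strip raw])]).isEmpty)
              = (!(bs ++ [b]).isEmpty) from by cases bs <;> rfl]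
            exact hrest
          obtain ⟨blocks', h1, h2⟩ := ih _ hpre'
          refine ⟨blocks', by rw [List.foldl_cons, hB, h1], ?_⟩
          rw [List.foldl_cons, hA]
          rw [hreq, hseq] at h2
          rw [show pvSkipOf (some l) (bs ++ [b]) = true from by rw [pvSkipOf_concat]; simp [hm, hl]]
          exact h2
        · -- A appends to the current genome; the last block is included
          have hskip' : pvSkipOf g blocks = false := by simpa using hskip
          have hrne : pvRender g blocks ≠ [] := by
            rcases hdisj with hI | ⟨hgne, hH⟩
            · simpa using hI
            · cases g with
              | none => simp at hgne
              | some l =>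
                have hl : l ≠ [] := by simpa using hgne
                have hbne : blocks ≠ [] := by
                  rcases blocks with _ | _
                  · simp at hH
                  · simp
                obtain ⟨bs, b, rfl⟩ : ∃ bs b, blocks = bs ++ [b] := by
                  rcases List.eq_nil_or_concat blocks with rfl | ⟨bs, b, h⟩
                  · exact absurd rfl hbne
                  · exact ⟨bs, b, by simp [h]⟩
                rw [pvSkipOf_concat] at hskip'
                have hm : b.1 ∈ l := by
                  by_contra hm
                  simp [hm, hl] at hskip'
                rw [pvRender_append_one]
                simp [pvIncl, hm]
          have hbne : blocks ≠ [] := by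
            intro h; subst h; exact hrne rfl
          obtain ⟨bs, b, rfl⟩ : ∃ bs b, blocks = bs ++ [b] := by
            rcases List.eq_nil_or_concat blocks with rfl | ⟨bs, b, h⟩
            · exact absurd rfl hbne
            · exact ⟨bs, b, by simp [h]⟩
          have hincl : pvIncl g b.1 = true := by
            cases g with
            | none => rfl
            | some l =>
              rw [pvSkipOf_concat] at hskip'
              rcases l with _ | ⟨a, t⟩
              · exact absurd (pvRender_some_nil _) hrne
              · have h' : b.1 = a ∨ b.1 ∈ t := by
                  by_cases hba : b.1 = a
                  · exact Or.inl hba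
                  · exact Or.inr (by simpa [hba] using hskip')
                simpa [pvIncl] using h'
          have hrw : pvRender g (bs ++ [b])
              = pvRender g bs ++ [(b.1, b.2.map pvChromB)] := by
            rw [pvRender_append_one, hincl]; rfl
          have hreq : pvRender g (bs ++ [(b.1, b.2 ++ [PySem.Str.strip raw])])
              = pvRender g bs ++ [(b.1, b.2.map pvChromB ++ [pvChromB (PySem.Str.strip raw)])] := by
            rw [pvRender_append_one]
            simp [hincl]
          have hseq : pvSkipOf g (bs ++ [(b.1, b.2 ++ [PySem.Str.strip raw])])
              = pvSkipOf g (bs ++ [b]) := by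
            rw [pvSkipOf_concat, pvSkipOf_concat]
          have hB : pvStepB (some (bs ++ [b])) raw
              = some (bs ++ [(b.1, b.2 ++ [PySem.Str.strip raw])]) := by
            simp [pvStepB, hs, hst, hmem, pvModifyLast_concat]
          have hA : pvStepA g (some (pvRender g (bs ++ [b]), pvSkipOf g (bs ++ [b]))) raw
              = some (pvRender g (bs ++ [(b.1, b.2 ++ [PySem.Str.strip raw])]),
                  pvSkipOf g (bs ++ [(b.1, b.2 ++ [PySem.Str.strip raw])])) := by
            rw [hreq, hseq, hrw]
            simp only [pvStepA]
            simp [hs, hst, hskip', hmem]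
            have : pvChromA (PySem.Str.strip raw) = pvChromB (PySem.Str.strip raw) := rfl
            simp [pvModifyLast_concat, this]
          have hpre' : pvPreAux g
              (!(bs ++ [(b.1, b.2 ++ [PySem.Str.strip raw])]).isEmpty)
              (!(pvRender g (bs ++ [(b.1, b.2 ++ [PySem.Str.strip raw])])).isEmpty)
              rest := by
            have e1 : (!(bs ++ [b]).isEmpty) = (!(bs ++ [(b.1, b.2 ++ [PySem.Str.strip raw])]).isEmpty) := by cases bs <;> rfl
            have e2 : (!(pvRender g (bs ++ [b])).isEmpty)
                = (!(pvRender g (bs ++ [(b.1, b.2 ++ [PySem.Str.strip raw])])).isEmpty) := by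
              rw [hrw, hreq]; cases pvRender g bs <;> rfl
            rw [← e1, ← e2]; exact hrest
          obtain ⟨blocks', h1, h2⟩ := ih _ hpre'
          exact ⟨blocks', by rw [List.foldl_cons, hB, h1], by rw [List.foldl_cons, hA, h2]⟩
      · -- blank line: both sides ignore it
        have hs : PySem.Str.strip raw = "" := by
          by_contra hs0
          rcases hb : PySem.Chars.startswith (PySem.Chars.strip raw.toList) ['>'] with _ | _
          · exact hch (by simp [pvIsChrom, pvLine, hs0, hb])
          · exact hhd (by simp [pvIsHeader, pvLine, hs0, hb])
        have hB : pvStepB (some blocks) raw = some blocks := by simp [pvStepB, hs]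
        have hA : pvStepA g (some (pvRender g blocks, pvSkipOf g blocks)) raw
            = some (pvRender g blocks, pvSkipOf g blocks) := by simp [pvStepA, hs]
        have hhd' : pvIsHeader raw = false := by simpa using hhd
        have hch' : pvIsChrom raw = false := by simpa using hch
        have hpre' := by simpa [pvPreAux, hhd', hch'] using hpre
        obtain ⟨blocks', h1, h2⟩ := ih blocks hpre'
        exact ⟨blocks', by rw [List.foldl_cons, hB, h1], by rw [List.foldl_cons, hA, h2]⟩

-- bridge: the ∀-index precondition implies the walking one
theorem pvPre_to_aux (g : Option (List String)) :
    ∀ (data : List String) (hH hI : Bool),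
    (∀ i, (hi : i < data.length) → pvIsChrom data[i] = true →
      pvWf data[i] = true ∧
      ((hI = true ∨ ∃ y ∈ data.take i, pvIsIncl g y = true) ∨
       (g.getD [] ≠ [] ∧ (hH = true ∨ ∃ y ∈ data.take i, pvIsHeader y = true)))) →
    pvPreAux g hH hI data := by
  intro data
  induction data with
  | nil => intro _ _ _; trivial
  | cons raw rest ih =>
    intro hH hI hyp
    have hyp' : ∀ (hH' hI' : Bool), (pvIsHeader raw = true → hH' = true) →
        (pvIsIncl g raw = true → hI' = true) → (hI = true → hI' = true) → (hH = true → hH' = true) →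
        (∀ i, (hi : i < rest.length) → pvIsChrom rest[i] = true →
          pvWf rest[i] = true ∧
          ((hI' = true ∨ ∃ y ∈ rest.take i, pvIsIncl g y = true) ∨
           (g.getD [] ≠ [] ∧ (hH' = true ∨ ∃ y ∈ rest.take i, pvIsHeader y = true)))) := by
      intro hH' hI' e1 e2 e3 e4 i hi hc
      have h := hyp (i + 1) (by simpa using hi) (by simpa using hc)
      rcases h with ⟨hwf, hor⟩
      refine ⟨by simpa using hwf, ?_⟩
      rw [List.take_succ_cons] at hor
      rcases hor with (hI0 | ⟨y, hy, hyi⟩) | ⟨hg, hH0 | ⟨y, hy, hyh⟩⟩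
      · exact Or.inl (Or.inl (e3 hI0))
      · rcases List.mem_cons.mp hy with rfl | hy'
        · exact Or.inl (Or.inl (e2 hyi))
        · exact Or.inl (Or.inr ⟨y, hy', hyi⟩)
      · exact Or.inr ⟨hg, Or.inl (e4 hH0)⟩
      · rcases List.mem_cons.mp hy with rfl | hy'
        · exact Or.inr ⟨hg, Or.inl (e1 hyh)⟩
        · exact Or.inr ⟨hg, Or.inr ⟨y, hy', hyh⟩⟩
    by_cases hhd : pvIsHeader raw = true
    · simp only [pvPreAux, hhd, if_true]
      exact ih true (hI || pvIsIncl g raw)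
        (hyp' true _ (fun _ => rfl) (fun h => by simp [h]) (fun h => by simp [h]) (fun _ => rfl))
    · have hhd' : pvIsHeader raw = false := by simpa using hhd
      have hinc' : pvIsIncl g raw = false := by simp [pvIsIncl, hhd']
      by_cases hch : pvIsChrom raw = true
      · simp only [pvPreAux, hhd', Bool.false_eq_true, if_false, hch, if_true]
        constructor
        · have h0 := hyp 0 (by simp) (by simpa using hch)
          rcases h0 with ⟨hwf, hor⟩
          refine ⟨by simpa using hwf, ?_⟩
          simp only [List.take_zero] at hor
          rcases hor with (hI0 | ⟨y, hy, _⟩) | ⟨hg, hH0 | ⟨y, hy, _⟩⟩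
          · exact Or.inl hI0
          · simp at hy
          · exact Or.inr ⟨hg, hH0⟩
          · simp at hy
        · exact ih hH hI
            (hyp' hH hI (fun h => by rw [h] at hhd'; cases hhd') (fun h => by rw [h] at hinc'; cases hinc') id id)
      · have hch' : pvIsChrom raw = false := by simpa using hch
        simp only [pvPreAux, hhd', hch', Bool.false_eq_true, if_false]
        exact ih hH hI
          (hyp' hH hI (fun h => by rw [h] at hhd'; cases hhd') (fun h => by rw [h] at hinc'; cases hinc') id id)

-- ===== VERDICT (by name: the statement is the Claim_ definition above) =====
theorem parseUniMoG_spec : Claim_equal_parseUniMoG := by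
  intro data g _ hpre
  unfold Spec_parseUniMoG
  have haux : pvPreAux g false false data := by
    apply pvPre_to_aux
    intro i hi hc
    obtain ⟨hwf, hor⟩ := hpre i hi hc
    refine ⟨hwf, ?_⟩
    rcases hor with h | ⟨h1, h2⟩
    · exact Or.inl (Or.inr h)
    · exact Or.inr ⟨h1, Or.inr h2⟩
  have := pvMain g data [] (by simpa [pvRender] using haux)
  obtain ⟨blocks', hB, hA⟩ := this
  simp only [parseUniMoG, parseUniMoG_alt]
  have h0 : pvRender g ([] : List (String × List String)) = [] := rfl
  have hs0 : pvSkipOf g ([] : List (String × List String)) = false := by cases g <;> rfl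
  rw [h0, hs0] at hA
  rw [hA, hB]
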